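-- pv_equiv track=rewrite | github.com/shreyysk/GoCubes | src/utils/__init__.py | validate_scramble
-- ===== SOURCE A (Python) =====
-- def validate_scramble(scramble: str) -> bool:
--     """
--     Validate scramble notation
--
--     Args:
--         scramble: Scramble string
--
--     Returns:
--         True if valid
--     """
--     if not scramble:
--         return False
--
--     valid_moves = set([
--         'U', "U'", 'U2', 'D', "D'", 'D2',
--         'F', "F'", 'F2', 'B', "B'", 'B2',
--         'R', "R'", 'R2', 'L', "L'", 'L2',
--         'M', "M'", 'M2', 'E', "E'", 'E2',
--         'S', "S'", 'S2', 'x', "x'", 'x2',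
--         'y', "y'", 'y2', 'z', "z'", 'z2',
--         'u', "u'", 'u2', 'd', "d'", 'd2',
--         'r', "r'", 'r2', 'l', "l'", 'l2',
--         'f', "f'", 'f2', 'b', "b'", 'b2'
--     ])
--
--     moves = scramble.strip().split()
--
--     # Check each move
--     for move in moves:
--         if move not in valid_moves:
--             return False
--
--     # Check for consecutive same face moves
--     for i in range(1, len(moves)):
--         if moves[i][0] == moves[i-1][0]:
--             return False
--
--     return True
-- ===== SOURCE B (Python) =====
-- def validate_scramble(scramble: str) -> bool:
--     """Validate scramble notation: single pass, face+modifier decomposition."""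
--     if not scramble:
--         return False
--     faces = set("UDFBRLMESxyzudrlfb")
--     modifiers = {"", "'", "2"}
--     prev_face = None
--     for move in scramble.strip().split():
--         face, mod = move[:1], move[1:]
--         if face not in faces or mod not in modifiers or face == prev_face:
--             return False
--         prev_face = face
--     return True
-- ===== Notes on version B (the rewrite author's own statement) =====
-- stated objective: simpler
-- what changed: Replaces the 54-element enumerated move set and two separate passes (a membership scan, then an index loop over adjacent pairs) by a single pass that decomposes each move into a one-letter face prefix and a modifier suffix (empty, prime or double), checked against an 18-face set while carrying a prev_face accumulator.
import Mathlib
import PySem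

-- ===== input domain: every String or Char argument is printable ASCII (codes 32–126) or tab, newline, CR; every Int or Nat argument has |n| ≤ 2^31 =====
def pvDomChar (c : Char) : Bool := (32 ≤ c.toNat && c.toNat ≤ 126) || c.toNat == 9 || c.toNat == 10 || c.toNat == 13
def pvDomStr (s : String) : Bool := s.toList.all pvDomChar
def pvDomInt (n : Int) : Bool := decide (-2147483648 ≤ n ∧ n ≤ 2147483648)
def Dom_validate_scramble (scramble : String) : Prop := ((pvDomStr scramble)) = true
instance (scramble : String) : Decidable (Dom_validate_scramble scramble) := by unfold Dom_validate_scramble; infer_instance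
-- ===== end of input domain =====

-- B replaces A's 54-element enumerated move set and two separate passes by one pass that
-- decomposes each move as face[:1] + modifier[1:] with a prev_face accumulator (objective: simpler).

-- ===== PORT A =====
def pvValidMoves : PySem.Set String := PySem.Set.ofList [
  "U", "U'", "U2", "D", "D'", "D2",
  "F", "F'", "F2", "B", "B'", "B2",
  "R", "R'", "R2", "L", "L'", "L2",
  "M", "M'", "M2", "E", "E'", "E2",
  "S", "S'", "S2", "x", "x'", "x2",
  "y", "y'", "y2", "z", "z'", "z2",
  "u", "u'", "u2", "d", "d'", "d2",
  "r", "r'", "r2", "l", "l'", "l2",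
  "f", "f'", "f2", "b", "b'", "b2"]

-- 'for move in moves: if move not in valid_moves: return False'
def pvALoop1 : List String → Bool
  | [] => true
  | m :: rest => if !(PySem.Set.contains pvValidMoves m) then false else pvALoop1 rest

-- 'for i in range(1, len(moves)): if moves[i][0] == moves[i-1][0]: return False'
-- (moves[i] is in range throughout the loop, so pyGetD is exact; moves[i][0] via Str.pyGet?,
-- exact wherever Python does not raise — A only reaches this loop on nonempty tokens)
def pvALoop2 (moves : List String) : Bool :=
  (PySem.List.pyRange 1 (moves.length : Int) 1).all (fun i =>
    !(PySem.Str.pyGet? (PySem.List.pyGetD moves i "") 0 ==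
      PySem.Str.pyGet? (PySem.List.pyGetD moves (i - 1) "") 0))

def validate_scramble (scramble : String) : Bool :=
  if scramble == "" then false
  else
    let moves := PySem.Str.split₀ (PySem.Str.strip scramble)
    if !pvALoop1 moves then false
    else if !pvALoop2 moves then false
    else true

-- ===== PORT B =====
def pvFaces : PySem.Set String := PySem.Set.ofList
  ["U", "D", "F", "B", "R", "L", "M", "E", "S", "x", "y", "z", "u", "d", "r", "l", "f", "b"]

def pvMods : PySem.Set String := PySem.Set.ofList ["", "'", "2"]

-- single pass with a prev_face accumulator
def pvBLoop : List String → Option String → Bool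
  | [], _ => true
  | m :: rest, prev =>
    let face := PySem.Str.slice m (some 0) (some 1)
    let md := PySem.Str.slice m (some 1) none
    if !(PySem.Set.contains pvFaces face) || !(PySem.Set.contains pvMods md)
        || (some face == prev) then false
    else pvBLoop rest (some face)

def validate_scramble_alt (scramble : String) : Bool :=
  if scramble == "" then false
  else pvBLoop (PySem.Str.split₀ (PySem.Str.strip scramble)) none

-- ===== PRECONDITION & SPEC =====
def Spec_validate_scramble (scramble : String) (out : Bool) : Prop := out = validate_scramble_alt scramble
instance (scramble : String) (out : Bool) : Decidable (Spec_validate_scramble scramble out) := by unfold Spec_validate_scramble; infer_instance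

-- ===== CLAIM (what is proved, stated in full; the proofs are below) =====
def Claim_equal_validate_scramble : Prop := ∀ (scramble : String), Dom_validate_scramble scramble → Spec_validate_scramble scramble (validate_scramble scramble)

-- ===== LEMMAS AND PROOFS =====

-- the face of a move, as B computes it
def pvFaceOf (m : String) : String := PySem.Str.slice m (some 0) (some 1)

-- B's adjacency chain, separated from the validity test
def pvChainS : Option String → List String → Bool
  | _, [] => true
  | prev, m :: rest => !(some (pvFaceOf m) == prev) && pvChainS (some (pvFaceOf m)) rest

-- factorization: membership in A's 54-move set = face ∈ pvFaces ∧ modifier ∈ pvMods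
set_option maxRecDepth 8192 in
lemma pvMember_factor (m : String) :
    PySem.Set.contains pvValidMoves m =
      (PySem.Set.contains pvFaces (PySem.Str.slice m (some 0) (some 1)) &&
       PySem.Set.contains pvMods (PySem.Str.slice m (some 1) none)) := by
  rw [Bool.eq_iff_iff]
  rw [← String.ofList_toList (s := m)]
  match cs : m.toList with
  | [] => decide
  | c :: rest =>
    simp only [Bool.and_eq_true]
    simp [pvValidMoves, pvFaces, pvMods, PySem.Set.contains, PySem.Set.ofList,
      String.ext_iff, PySem.Str.slice, PySem.List.slice_from_one, PySem.List.slice_to]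
    by_cases h2 : rest = [] ∨ rest = ['\''] ∨ rest = ['2']
    · rcases h2 with h2 | h2 | h2 <;> subst h2 <;> simp
    · push Not at h2
      simp [h2.1, h2.2.1, h2.2.2]

set_option maxRecDepth 8192 in
lemma pvValid_nonempty (m : String) (h : PySem.Set.contains pvValidMoves m = true) :
    m.toList ≠ [] := by
  intro hnil
  have hm : m = "" := by
    rw [← String.ofList_toList (s := m), hnil]
  subst hm
  revert h; decide

-- B's loop = A's membership pass && the adjacency chain
lemma pvBLoop_eq (moves : List String) (prev : Option String) :
    pvBLoop moves prev = (pvALoop1 moves && pvChainS prev moves) := by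
  induction moves generalizing prev with
  | nil => simp [pvBLoop, pvALoop1, pvChainS]
  | cons m rest ih =>
    simp only [pvBLoop, pvALoop1, pvChainS, pvMember_factor, pvFaceOf]
    cases hf : PySem.Set.contains pvFaces (PySem.Str.slice m (some 0) (some 1)) <;>
      cases hmd : PySem.Set.contains pvMods (PySem.Str.slice m (some 1) none) <;>
        cases hp : (some (PySem.Str.slice m (some 0) (some 1)) == prev) <;>
          simp [ih]

-- pyRange shifted by one is a map by (· + 1)
lemma pvRange_shift (a b : Int) :
    PySem.List.pyRange (a + 1) (b + 1) 1 = (PySem.List.pyRange a b 1).map (· + 1) := by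
  by_cases h : a < b
  · rw [PySem.List.pyRange_one_cons h, PySem.List.pyRange_one_cons (by omega), List.map_cons]
    exact congrArg _ (pvRange_shift (a + 1) b)
  · rw [PySem.List.pyRange_one_eq_nil (by omega), PySem.List.pyRange_one_eq_nil (by omega),
      List.map_nil]
termination_by (b - a).toNat
decreasing_by omega

lemma pvGetD_cons_shift (x : String) (xs : List String) (i : Int) (hi : 0 ≤ i) :
    PySem.List.pyGetD (x :: xs) (i + 1) "" = PySem.List.pyGetD xs i "" := by
  lift i to Nat using hi
  rw [show ((i : Int) + 1) = ((i + 1 : Nat) : Int) by push_cast; ring]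
  rw [PySem.List.pyGetD_natCast, PySem.List.pyGetD_natCast]
  simp [List.getD]

-- all-congruence on members (PySem ships only the `any` version)
lemma pvAll_congr {α : Type} {l : List α} {f g : α → Bool} (h : ∀ x ∈ l, f x = g x) :
    l.all f = l.all g := by
  induction l with
  | nil => rfl
  | cons x xs ih =>
    simp only [List.all_cons, h x List.mem_cons_self,
      ih (fun y hy => h y (List.mem_cons_of_mem x hy))]

-- first chars are equal iff the one-character face slices are equal (nonempty strings)
lemma pvFace_beq (m1 m2 : String) (h1 : m1.toList ≠ []) (h2 : m2.toList ≠ []) :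
    (PySem.Str.pyGet? m2 0 == PySem.Str.pyGet? m1 0) = (pvFaceOf m2 == pvFaceOf m1) := by
  match c1s : m1.toList, c2s : m2.toList with
  | [], _ => exact absurd c1s h1
  | _ :: _, [] => exact absurd c2s h2
  | c1 :: r1, c2 :: r2 =>
    rw [Bool.eq_iff_iff]
    simp [pvFaceOf, PySem.Str.slice, PySem.Str.pyGet?, String.ext_iff, c1s, c2s,
      PySem.List.slice_to]

lemma pvALoop2_cons_cons (m1 m2 : String) (rest : List String) :
    pvALoop2 (m1 :: m2 :: rest) =
      (!(PySem.Str.pyGet? m2 0 == PySem.Str.pyGet? m1 0) && pvALoop2 (m2 :: rest)) := by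
  unfold pvALoop2
  rw [show ((m1 :: m2 :: rest).length : Int) = ((m2 :: rest).length : Int) + 1 by
    push_cast [List.length_cons]; ring]
  rw [PySem.List.pyRange_one_cons
    (show (1 : Int) < ((m2 :: rest).length : Int) + 1 by push_cast [List.length_cons]; omega)]
  rw [List.all_cons]
  congr 1
  · rw [show ((1 : Int) - 1) = 0 by ring,
      show (1 : Int) = (0 : Int) + 1 by ring,
      pvGetD_cons_shift m1 (m2 :: rest) 0 le_rfl,
      PySem.List.pyGetD_zero_cons, PySem.List.pyGetD_zero_cons]
  · rw [show (1 : Int) + 1 = 1 + 1 by ring, pvRange_shift 1 ((m2 :: rest).length : Int),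
      List.all_map]
    refine pvAll_congr (fun i hi => ?_)
    have hmem : 1 ≤ i ∧ i < ((m2 :: rest).length : Int) :=
      (PySem.List.mem_pyRange_one).1 hi
    have e1 : PySem.List.pyGetD (m1 :: m2 :: rest) (i + 1) "" =
        PySem.List.pyGetD (m2 :: rest) i "" :=
      pvGetD_cons_shift m1 (m2 :: rest) i (by omega)
    have e2 := pvGetD_cons_shift m1 (m2 :: rest) (i - 1) (by omega)
    rw [sub_add_cancel] at e2
    simp only [Function.comp, add_sub_cancel_right, e1, e2]

lemma pvALoop1_cons (m : String) (rest : List String) :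
    pvALoop1 (m :: rest) = (PySem.Set.contains pvValidMoves m && pvALoop1 rest) := by
  simp only [pvALoop1]
  cases PySem.Set.contains pvValidMoves m <;> simp

-- on valid moves, A's index loop computes B's chain
set_option maxRecDepth 8192 in
lemma pvALoop2_eq_chain (moves : List String) (h : pvALoop1 moves = true) :
    pvALoop2 moves = pvChainS none moves := by
  match moves with
  | [] => simp [pvALoop2, pvChainS, PySem.List.pyRange_one_eq_nil (show (0:Int) ≤ 1 by norm_num)]
  | [m] => simp [pvALoop2, pvChainS, PySem.List.pyRange_one_eq_nil (le_refl (1 : Int))]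
  | m1 :: m2 :: rest =>
    rw [pvALoop1_cons] at h
    obtain ⟨h1, h2⟩ := Bool.and_eq_true_iff.mp h
    have h2v : PySem.Set.contains pvValidMoves m2 = true := by
      have h3 := h2
      rw [pvALoop1_cons] at h3
      exact (Bool.and_eq_true_iff.mp h3).1
    rw [pvALoop2_cons_cons, pvALoop2_eq_chain (m2 :: rest) h2,
      pvFace_beq m1 m2 (pvValid_nonempty m1 h1) (pvValid_nonempty m2 h2v)]
    cases rest with
    | nil => simp [pvChainS]
    | cons m3 tl => simp [pvChainS]

lemma pvMain (moves : List String) :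
    (if !pvALoop1 moves then false else if !pvALoop2 moves then false else true) =
      pvBLoop moves none := by
  rw [pvBLoop_eq]
  by_cases h : pvALoop1 moves = true
  · simp [h, pvALoop2_eq_chain moves h]
  · simp [Bool.eq_false_iff.mpr h]

-- ===== VERDICT (by name: the statement is the Claim_ definition above) =====
theorem validate_scramble_spec : Claim_equal_validate_scramble := by
  intro s _
  unfold Spec_validate_scramble validate_scramble validate_scramble_alt
  by_cases hs : s == ""
  · simp [hs]
  · simp only [hs, if_false, Bool.false_eq_true]
    exact pvMain _
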